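-- pv_equiv track=rewrite | github.com/denim-bluu/meeting_transcripts_cleaner | tests/test_accuracy_optional.py | _has_repetition_reduction
-- ===== SOURCE A (Python) =====
-- def _has_repetition_reduction(original: str, cleaned: str) -> bool:
--     """Check if repetition was reduced."""
--     original_words = original.split()
--     cleaned_words = cleaned.split()
--
--     # Count consecutive repeated words
--     def count_repetitions(words):
--         count = 0
--         for i in range(len(words) - 1):
--             if words[i] == words[i + 1]:
--                 count += 1
--         return count
--
--     return count_repetitions(cleaned_words) < count_repetitions(original_words)
-- ===== SOURCE B (Python) =====
-- def _has_repetition_reduction(original: str, cleaned: str) -> bool: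
--     """Check if repetition was reduced."""
--
--     def count_repetitions(words):
--         # Two-pointer run skipping: advance j over each maximal run of equal
--         # words; a run of length L contributes L - 1 repetitions.
--         total = 0
--         i = 0
--         n = len(words)
--         while i < n:
--             j = i + 1
--             while j < n and words[j] == words[i]:
--                 j += 1
--             total += j - i - 1
--             i = j
--         return total
--
--     return count_repetitions(cleaned.split()) < count_repetitions(original.split())
-- ===== Notes on version B (the rewrite author's own statement) =====
-- stated objective: alternative
-- what changed: Replaced A's single pairwise index loop (compare words[i] with words[i+1] for every i) by a nested two-pointer run-skipping scan: an inner while advances over each maximal run of equal words and each run of length L contributes L-1 repetitions.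
import Mathlib
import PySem

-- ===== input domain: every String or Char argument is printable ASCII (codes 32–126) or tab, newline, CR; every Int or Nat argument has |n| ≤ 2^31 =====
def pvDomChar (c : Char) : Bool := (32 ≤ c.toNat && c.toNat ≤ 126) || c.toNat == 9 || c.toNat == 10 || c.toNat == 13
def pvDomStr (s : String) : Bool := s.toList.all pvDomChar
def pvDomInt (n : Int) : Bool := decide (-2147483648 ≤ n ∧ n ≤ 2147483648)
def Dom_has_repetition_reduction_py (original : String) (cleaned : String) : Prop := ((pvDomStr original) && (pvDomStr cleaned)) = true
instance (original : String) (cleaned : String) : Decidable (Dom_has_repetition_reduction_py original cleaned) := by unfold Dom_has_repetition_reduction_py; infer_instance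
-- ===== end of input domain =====

-- B replaces A's pairwise index loop by a nested two-pointer run-skipping scan
-- (each maximal run of L equal words contributes L-1); objective: alternative, same O(n) cost.


-- ===== PORT A =====
-- count_repetitions: index loop over range(len(words)-1) comparing words[i] and words[i+1]
-- (indices are always in range, so words[i] is ported as pyGetD with an unused default)
def pvCountRepsA (words : List String) : Int :=
  (PySem.List.pyRange 0 (PySem.List.len words - 1) 1).foldl
    (fun count i =>
      if PySem.List.pyGetD words i "" = PySem.List.pyGetD words (i + 1) "" then count + 1 else count)
    0

def has_repetition_reduction_py (original : String) (cleaned : String) : Bool :=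
  let original_words := PySem.Str.split₀ original
  let cleaned_words := PySem.Str.split₀ cleaned
  decide (pvCountRepsA cleaned_words < pvCountRepsA original_words)

-- ===== PORT B =====
-- inner while: consume the maximal run of words equal to w, returning (run followers, rest);
-- k = j - i - 1 for that run (the list version of the index pair i, j)
def pvRun (w : String) : List String → Nat × List String
  | [] => (0, [])
  | x :: t => if x = w then let p := pvRun w t; (p.1 + 1, p.2) else (0, x :: t)

-- outer while: one step per maximal run, accumulating (run length - 1);
-- fuel = words.length only makes the recursion structural (pvRun_len shows it is never exhausted)
def pvCountB_go : Nat → List String → Int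
  | _, [] => 0
  | 0, _ :: _ => 0
  | fuel + 1, w :: t => ((pvRun w t).1 : Int) + pvCountB_go fuel (pvRun w t).2

def pvCountRepsB (words : List String) : Int := pvCountB_go words.length words

def has_repetition_reduction_py_alt (original : String) (cleaned : String) : Bool :=
  decide (pvCountRepsB (PySem.Str.split₀ cleaned) < pvCountRepsB (PySem.Str.split₀ original))

-- ===== PRECONDITION & SPEC =====
def Spec_has_repetition_reduction_py (original : String) (cleaned : String) (out : Bool) : Prop := out = has_repetition_reduction_py_alt original cleaned
instance (original : String) (cleaned : String) (out : Bool) : Decidable (Spec_has_repetition_reduction_py original cleaned out) := by unfold Spec_has_repetition_reduction_py; infer_instance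

-- ===== CLAIM (what is proved, stated in full; the proofs are below) =====
def Claim_equal_has_repetition_reduction_py : Prop := ∀ (original : String) (cleaned : String), Dom_has_repetition_reduction_py original cleaned → Spec_has_repetition_reduction_py original cleaned (has_repetition_reduction_py original cleaned)

-- ===== LEMMAS AND PROOFS =====

theorem pvRun_len (w : String) (t : List String) : (pvRun w t).2.length ≤ t.length := by
  induction t with
  | nil => simp [pvRun]
  | cons x t ih =>
    by_cases h : x = w
    · simp only [pvRun, if_pos h]
      exact ih.trans (Nat.le_succ _)
    · simp [pvRun, if_neg h]

-- adjacent-equal pair count, the common characterisation of both loops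
def pvChain (p : String) : List String → Int
  | [] => 0
  | w :: t => (if w = p then 1 else 0) + pvChain w t

def pvPairCount : List String → Int
  | [] => 0
  | a :: t => pvChain a t

theorem pvCountA_range (ws : List String) :
    pvCountRepsA ws =
      ((List.range (ws.length - 1)).countP
        (fun k => ws.getD k "" = ws.getD (k + 1) "") : Int) := by
  unfold pvCountRepsA
  rw [PySem.List.foldl_ite_add_one, PySem.List.pyRange_one, List.countP_map]
  have h1 : ((PySem.List.len ws - 1 - 0).toNat) = ws.length - 1 := by
    simp [PySem.List.len]
  rw [h1]
  simp only [zero_add, Nat.cast_inj]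
  apply List.countP_congr
  intro k hk
  simp only [Function.comp_apply]
  rw [show ((k : Int) + 1) = ((k + 1 : Nat) : Int) by push_cast; ring,
      PySem.List.pyGetD_natCast, PySem.List.pyGetD_natCast]

theorem pvRangeCount_eq_pairCount (ws : List String) :
    ((List.range (ws.length - 1)).countP
        (fun k => ws.getD k "" = ws.getD (k + 1) "") : Int) = pvPairCount ws := by
  induction ws with
  | nil => simp [pvPairCount]
  | cons a tl ih =>
    cases tl with
    | nil => simp [pvPairCount, pvChain]
    | cons b t =>
      have hlen : (a :: b :: t).length - 1 = t.length + 1 := by simp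
      have hc : (List.range t.length).countP
          ((fun k => decide ((a :: b :: t).getD k "" = (a :: b :: t).getD (k + 1) "")) ∘ Nat.succ)
          = (List.range ((b :: t).length - 1)).countP
            (fun k => decide ((b :: t).getD k "" = (b :: t).getD (k + 1) "")) := by
        have hl : (b :: t).length - 1 = t.length := by simp
        rw [hl]
        apply List.countP_congr
        intro k hk
        simp [Function.comp, List.getD]
      rw [hlen, List.range_succ_eq_map, List.countP_cons, List.countP_map, hc]
      push_cast
      rw [ih]
      have hgd : ((a :: b :: t).getD 0 "" = (a :: b :: t).getD 1 "") = (a = b) := by rfl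
      by_cases hab : a = b
      · subst hab
        simp [pvPairCount, pvChain]
        ring
      · simp [pvPairCount, pvChain, hab]
        exact fun hba => hab hba.symm

-- consuming the maximal run explains the chain count: chain w t = run length + pairs of the rest
theorem pvChain_run (w : String) (t : List String) :
    pvChain w t = ((pvRun w t).1 : Int) + pvPairCount (pvRun w t).2 := by
  induction t generalizing w with
  | nil => simp [pvChain, pvRun, pvPairCount]
  | cons x t ih =>
    by_cases h : x = w
    · subst h
      simp only [pvRun, pvChain]
      rw [ih x]
      push_cast; ring
    · simp [pvRun, pvChain, h, pvPairCount]

theorem pvCountB_go_eq (fuel : Nat) (ws : List String) (h : ws.length ≤ fuel) :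
    pvCountB_go fuel ws = pvPairCount ws := by
  induction fuel generalizing ws with
  | zero =>
    cases ws with
    | nil => simp [pvCountB_go, pvPairCount]
    | cons w t => simp at h
  | succ fuel ih =>
    cases ws with
    | nil => simp [pvCountB_go, pvPairCount]
    | cons w t =>
      rw [pvCountB_go, ih _ ((pvRun_len w t).trans (by simpa using h)), ← pvChain_run]
      rfl

theorem pvCountB_eq_pairCount (ws : List String) : pvCountRepsB ws = pvPairCount ws :=
  pvCountB_go_eq ws.length ws le_rfl

theorem pvCount_eq (ws : List String) : pvCountRepsA ws = pvCountRepsB ws := by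
  rw [pvCountA_range, pvRangeCount_eq_pairCount, pvCountB_eq_pairCount]

-- ===== VERDICT (by name: the statement is the Claim_ definition above) =====
theorem has_repetition_reduction_py_spec : Claim_equal_has_repetition_reduction_py := by
  intro original cleaned _
  unfold Spec_has_repetition_reduction_py has_repetition_reduction_py has_repetition_reduction_py_alt
  simp only [pvCount_eq]
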